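-- pv_equiv track=rewrite | github.com/Ricardo-Luis-Projects/ist-asa-p1 | stats.py | get_si_subsequences
-- ===== SOURCE A (Python) =====
-- def get_si_subsequences(input):
--     """
--     Returns all of the subsequences of input.
--     """
--     if len(input) == 0:
--         return []
--     elif len(input) == 1:
--         return [input]
--     else:
--         ss1 = get_si_subsequences(input[1:])
--         ss2 = list(filter(lambda x: x[0] > input[0], ss1))
--         return ss1 + [[input[0]] + i for i in ([[]] + ss2)]
-- ===== SOURCE B (Python) =====
-- def get_si_subsequences(input):
--     """
--     Returns all of the subsequences of input.
--     """
--     if len(input) == 0: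
--         return []
--     result = [[input[-1]]]
--     for x in reversed(input[:-1]):
--         ss2 = [s for s in result if s[0] > x]
--         result = result + [[x]] + [[x] + s for s in ss2]
--     return result
-- ===== Notes on version B (the rewrite author's own statement) =====
-- stated objective: alternative
-- what changed: Replaced the suffix recursion with a bottom-up iterative loop that scans the list back-to-front, maintaining the growing result list with one append-and-extend step per element.
import Mathlib
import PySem

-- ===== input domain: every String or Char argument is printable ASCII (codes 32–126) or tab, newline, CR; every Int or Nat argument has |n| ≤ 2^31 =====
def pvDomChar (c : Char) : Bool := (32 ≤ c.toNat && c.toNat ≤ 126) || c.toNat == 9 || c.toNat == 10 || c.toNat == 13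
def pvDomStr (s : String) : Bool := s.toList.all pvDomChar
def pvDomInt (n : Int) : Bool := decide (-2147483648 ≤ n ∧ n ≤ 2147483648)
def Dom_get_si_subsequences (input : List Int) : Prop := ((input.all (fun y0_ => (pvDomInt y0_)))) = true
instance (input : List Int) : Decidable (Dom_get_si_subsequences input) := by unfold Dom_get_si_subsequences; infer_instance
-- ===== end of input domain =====

-- B rewrites A's suffix recursion as a bottom-up iterative loop over the list reversed (alternative decomposition, same cost); return-value equivalence only.

-- ===== PORT A =====
-- recursion on input, exactly A's three cases; s[0] on the nonempty members of ss1 is headI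
def get_si_subsequences : List Int → List (List Int)
  | [] => []
  | [x] => [[x]]
  | x :: y :: rest =>
    let ss1 := get_si_subsequences (y :: rest)
    let ss2 := ss1.filter (fun s => s.headI > x)
    ss1 ++ ([[]] ++ ss2).map (fun i => x :: i)

-- ===== PORT B =====
-- the body of B's for-loop
def pvStepB (result : List (List Int)) (x : Int) : List (List Int) :=
  let ss2 := result.filter (fun s => s.headI > x)
  result ++ [[x]] ++ ss2.map (fun s => x :: s)

-- B: seed with [[input[-1]]], fold the loop body over reversed(input[:-1])
def get_si_subsequences_alt (input : List Int) : List (List Int) :=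
  match input.getLast? with
  | none => []
  | some last => input.dropLast.reverse.foldl pvStepB [[last]]

-- ===== PRECONDITION & SPEC =====
def Spec_get_si_subsequences (input : List Int) (out : List (List Int)) : Prop := out = get_si_subsequences_alt input
instance (input : List Int) (out : List (List Int)) : Decidable (Spec_get_si_subsequences input out) := by unfold Spec_get_si_subsequences; infer_instance

-- ===== CLAIM (what is proved, stated in full; the proofs are below) =====
def Claim_equal_get_si_subsequences : Prop := ∀ (input : List Int), Dom_get_si_subsequences input → Spec_get_si_subsequences input (get_si_subsequences input)

-- ===== LEMMAS AND PROOFS =====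

-- A's recursive step on a nonempty tail is exactly B's loop body
theorem pv_step_A (x y : Int) (rest : List Int) :
    get_si_subsequences (x :: y :: rest) = pvStepB (get_si_subsequences (y :: rest)) x := by
  simp [get_si_subsequences, pvStepB]

-- B's step commutes with prepending: alt (x :: l) = pvStepB (alt l) x for nonempty l
theorem pv_step_B (x y : Int) (rest : List Int) :
    get_si_subsequences_alt (x :: y :: rest) = pvStepB (get_si_subsequences_alt (y :: rest)) x := by
  unfold get_si_subsequences_alt
  have h : (y :: rest).getLast? = some ((y :: rest).getLast (by simp)) := by
    simp [List.getLast?_eq_getLast]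
  rw [h]
  have h2 : (x :: y :: rest).getLast? = some ((y :: rest).getLast (by simp)) := by
    simp [List.getLast?_eq_getLast, List.getLast_cons]
  rw [h2]
  have h3 : (x :: y :: rest).dropLast.reverse = (y :: rest).dropLast.reverse ++ [x] := by
    simp [List.dropLast_cons_of_ne_nil]
  rw [h3]
  simp [List.foldl_append]

theorem pv_agree : ∀ (input : List Int), get_si_subsequences input = get_si_subsequences_alt input
  | [] => by simp [get_si_subsequences, get_si_subsequences_alt]
  | [x] => by simp [get_si_subsequences, get_si_subsequences_alt]
  | x :: y :: rest => by
    rw [pv_step_A, pv_step_B, pv_agree (y :: rest)]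

-- ===== VERDICT (by name: the statement is the Claim_ definition above) =====
theorem get_si_subsequences_spec : Claim_equal_get_si_subsequences := by
  intro input _
  unfold Spec_get_si_subsequences
  exact pv_agree input
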